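-- pv_equiv track=rewrite | github.com/cozy-hn/noj.am | mobis_1.py | caltime
-- ===== SOURCE A (Python) =====
-- from heapq import heappush, heappop
--
-- def caltime(n,k,reqs,mento):
--     time=0
--     mentoroom=[[0]*i for i in mento]
--     for req in reqs:
--         start, dur, room = req
--         room-=1
--         end=start+dur
--         wait=0
--         if mentoroom[room][0] > start:
--                 wait=mentoroom[room][0]-start
--                 time+=(wait)
--         heappop(mentoroom[room])
--         heappush(mentoroom[room],end+wait)
--     return time
-- ===== SOURCE B (Python) =====
-- def caltime(n, k, reqs, mento):
--     time = 0
--     rooms = [[0] * i for i in mento]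
--     for start, dur, room in reqs:
--         lst = rooms[room - 1]
--         m = min(lst)
--         wait = m - start if m > start else 0
--         time += wait
--         lst[lst.index(m)] = start + dur + wait
--     return time
-- ===== Notes on version B (the rewrite author's own statement) =====
-- stated objective: simpler
-- what changed: Replaces the per-room heapq binary heaps (heappop/heappush with sift-up/sift-down) by plain lists: each request reads the room's earliest slot with min() and overwrites it in place at its first index, maintaining the same multiset of availability times with no heap machinery.
import Mathlib
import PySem

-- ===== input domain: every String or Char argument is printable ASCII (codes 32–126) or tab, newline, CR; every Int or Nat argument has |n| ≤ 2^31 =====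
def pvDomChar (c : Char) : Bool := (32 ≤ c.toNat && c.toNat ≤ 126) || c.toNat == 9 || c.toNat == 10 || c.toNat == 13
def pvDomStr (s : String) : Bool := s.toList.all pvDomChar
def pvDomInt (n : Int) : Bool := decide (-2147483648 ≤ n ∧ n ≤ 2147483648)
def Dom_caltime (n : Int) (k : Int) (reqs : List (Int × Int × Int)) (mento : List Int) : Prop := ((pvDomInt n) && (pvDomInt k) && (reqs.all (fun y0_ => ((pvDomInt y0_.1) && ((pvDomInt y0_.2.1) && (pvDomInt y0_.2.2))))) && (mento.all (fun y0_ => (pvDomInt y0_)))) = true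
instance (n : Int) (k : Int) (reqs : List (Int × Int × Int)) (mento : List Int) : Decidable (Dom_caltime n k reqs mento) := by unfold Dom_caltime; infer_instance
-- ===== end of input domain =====

-- B replaces A's per-room binary heaps (heapq push/pop) by plain lists scanned with min()
-- and updated in place at the min's first index: same multiset of availability times, simpler code.
-- ===== PORT A =====

def pyWrapIdx (len : Nat) (i : Int) : Nat := (if i < 0 then i + len else i).toNat

-- CPython heapq._siftdown(heap, 0, pos) with newitem = v
def heapSiftdown (h : List Int) (v : Int) (pos : Nat) : List Int :=
  if hp : 0 < pos then
    let parentpos := (pos - 1) / 2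
    let parent := h.getD parentpos 0
    if v < parent then heapSiftdown (h.set pos parent) v parentpos
    else h.set pos v
  else h.set pos v
termination_by pos
decreasing_by omega

-- CPython heapq._siftup(heap, pos) loop; at the end heap[pos]=v then _siftdown(heap, 0, pos)
def heapSiftup (h : List Int) (v : Int) (pos : Nat) : List Int :=
  if hc : 2*pos+1 < h.length then
    let childpos := if 2*pos+2 < h.length ∧ ¬ (h.getD (2*pos+1) 0 < h.getD (2*pos+2) 0)
                    then 2*pos+2 else 2*pos+1
    heapSiftup (h.set pos (h.getD childpos 0)) v childpos
  else heapSiftdown (h.set pos v) v pos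
termination_by h.length - pos
decreasing_by
  simp only [List.length_set]
  split <;> omega

def heapPush (h : List Int) (item : Int) : List Int := heapSiftdown (h ++ [item]) item h.length

def heapPop (h : List Int) : Int × List Int :=
  let lastelt := h.getLast?.getD 0
  let h1 := h.dropLast
  if h1.isEmpty then (lastelt, h1)
  else (h1.headD 0, heapSiftup (h1.set 0 lastelt) lastelt 0)

def caltimeStep (st : Int × List (List Int)) (req : Int × Int × Int) : Int × List (List Int) :=
  let start := req.1
  let room := pyWrapIdx st.2.length (req.2.2 - 1)
  let endv := start + req.2.1
  let lst := st.2.getD room []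
  let wait := if lst.headD 0 > start then lst.headD 0 - start else 0
  (st.1 + wait, st.2.set room (heapPush (heapPop lst).2 (endv + wait)))

def caltime (n : Int) (k : Int) (reqs : List (Int × Int × Int)) (mento : List Int) : Int :=
  (reqs.foldl caltimeStep (0, mento.map (fun i => List.replicate i.toNat 0))).1

def caltimeAltStep (st : Int × List (List Int)) (req : Int × Int × Int) : Int × List (List Int) :=
  let start := req.1
  let lst := st.2.getD (pyWrapIdx st.2.length (req.2.2 - 1)) []
  let m := (PySem.List.min? lst (fun x => x)).getD 0
  let wait := if m > start then m - start else 0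
  (st.1 + wait,
   st.2.set (pyWrapIdx st.2.length (req.2.2 - 1))
     (lst.set ((PySem.List.index? lst m).getD 0) (start + req.2.1 + wait)))

def caltime_alt (n : Int) (k : Int) (reqs : List (Int × Int × Int)) (mento : List Int) : Int :=
  (reqs.foldl caltimeAltStep (0, mento.map (fun i => List.replicate i.toNat 0))).1

-- ===== PRECONDITION & SPEC =====
-- Pre_ excludes exactly the inputs where Python A raises: a request whose room index (after the
-- -1 shift, with Python's negative-index wraparound) is out of range (IndexError), or whose room
-- has no slots, mento value < 1 ('mentoroom[room][0]' raises IndexError on the empty list).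
def Pre_caltime (n : Int) (k : Int) (reqs : List (Int × Int × Int)) (mento : List Int) : Prop :=
  ∀ r ∈ reqs, -(mento.length : Int) ≤ r.2.2 - 1 ∧ r.2.2 - 1 < (mento.length : Int) ∧
    1 ≤ mento.getD (pyWrapIdx mento.length (r.2.2 - 1)) 0

instance (n : Int) (k : Int) (reqs : List (Int × Int × Int)) (mento : List Int) : Decidable (Pre_caltime n k reqs mento) := by unfold Pre_caltime; infer_instance

def pvWitness_caltime : Int × Int × (List (Int × Int × Int)) × List Int :=
  (1, 1, [(0, 2, 1), (3, 1, 1)], [2])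

def Spec_caltime (n : Int) (k : Int) (reqs : List (Int × Int × Int)) (mento : List Int) (out : Int) : Prop := out = caltime_alt n k reqs mento
instance (n : Int) (k : Int) (reqs : List (Int × Int × Int)) (mento : List Int) (out : Int) : Decidable (Spec_caltime n k reqs mento out) := by unfold Spec_caltime; infer_instance

-- ===== CLAIM (what is proved, stated in full; the proofs are below) =====
def Claim_equal_caltime : Prop := ∀ (n : Int) (k : Int) (reqs : List (Int × Int × Int)) (mento : List Int), Dom_caltime n k reqs mento → Pre_caltime n k reqs mento → Spec_caltime n k reqs mento (caltime n k reqs mento)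

-- ===== LEMMAS AND PROOFS =====
theorem getD_set_self' {α : Type} (l : List α) (i : Nat) (v d : α) (h : i < l.length) :
    (l.set i v).getD i d = v := by
  simp [List.getD_eq_getElem?_getD, h]

theorem getD_set_ne' {α : Type} (l : List α) (i j : Nat) (v d : α) (h : i ≠ j) :
    (l.set i v).getD j d = l.getD j d := by
  simp [List.getD_eq_getElem?_getD, List.getElem?_set_ne h]

theorem getD_set_self (l : List Int) (i : Nat) (v : Int) (h : i < l.length) :
    (l.set i v).getD i 0 = v := getD_set_self' l i v 0 h

theorem getD_set_ne (l : List Int) (i j : Nat) (v : Int) (h : i ≠ j) :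
    (l.set i v).getD j 0 = l.getD j 0 := getD_set_ne' l i j v 0 h

theorem ms_set (l : List Int) (i : Nat) (v : Int) (h : i < l.length) :
    l.getD i 0 ::ₘ ((l.set i v : List Int) : Multiset Int) = v ::ₘ (l : Multiset Int) := by
  induction l generalizing i with
  | nil => simp at h
  | cons x xs ih =>
    cases i with
    | zero => simp only [List.getD_cons_zero, List.set_cons_zero, ← Multiset.cons_coe]; exact Multiset.cons_swap _ _ _
    | succ i =>
      simp only [List.getD_cons_succ, List.set_cons_succ, ← Multiset.cons_coe]
      rw [Multiset.cons_swap, ih i (by simpa using h), Multiset.cons_swap]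

def heapOrd (h : List Int) : Prop :=
  ∀ i, 0 < i → i < h.length → h.getD ((i-1)/2) 0 ≤ h.getD i 0

theorem heapOrd_head_le (h : List Int) (ho : heapOrd h) :
    ∀ i, i < h.length → h.getD 0 0 ≤ h.getD i 0 := by
  intro i
  induction i using Nat.strong_induction_on with
  | _ i ih =>
    intro hi
    rcases Nat.eq_zero_or_pos i with h0 | h0
    · subst h0; exact le_refl _
    · exact le_trans (ih ((i-1)/2) (by omega) (by omega)) (ho i h0 hi)
theorem coe_concat (l : List Int) (a : Int) :
    ((l ++ [a] : List Int) : Multiset Int) = a ::ₘ (l : Multiset Int) := by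
  rw [← Multiset.coe_add, Multiset.add_comm]
  simp [Multiset.singleton_add]

theorem siftdown_ms (h : List Int) (v : Int) (pos : Nat) (hpos : pos < h.length) :
    h.getD pos 0 ::ₘ ((heapSiftdown h v pos : List Int) : Multiset Int)
      = v ::ₘ (h : Multiset Int) := by
  induction h, pos using heapSiftdown.induct v with
  | case1 h pos hp pp par hlt ih =>
    rw [heapSiftdown]; simp only [hp, reduceDIte]
    rw [if_pos hlt]
    show h.getD pos 0 ::ₘ ↑(heapSiftdown (h.set pos par) v pp) = v ::ₘ (h : Multiset Int)
    have h1 := ih (by simp only [List.length_set]; omega)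
    rw [getD_set_ne h pos pp par (by omega)] at h1
    have h2 := ms_set h pos par hpos
    have e2 : par ::ₘ (h.getD pos 0 ::ₘ (↑(heapSiftdown (h.set pos par) v pp) : Multiset Int))
        = par ::ₘ (v ::ₘ (h : Multiset Int)) := by
      rw [Multiset.cons_swap, h1, Multiset.cons_swap, h2, Multiset.cons_swap]
    exact (Multiset.cons_inj_right par).1 e2
  | case2 h pos hp pp par hnlt =>
    rw [heapSiftdown]; simp only [hp, reduceDIte]
    rw [if_neg hnlt]
    exact ms_set h pos v hpos
  | case3 h pos hp =>
    rw [heapSiftdown]; simp only [hp, reduceDIte]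
    exact ms_set h pos v hpos

theorem siftup_ms (h : List Int) (v : Int) (pos : Nat) (hpos : pos < h.length) :
    h.getD pos 0 ::ₘ ((heapSiftup h v pos : List Int) : Multiset Int)
      = v ::ₘ (h : Multiset Int) := by
  induction h, pos using heapSiftup.induct with
  | case1 h pos hc cp ih =>
    rw [heapSiftup]; simp only [hc, reduceDIte]
    show h.getD pos 0 ::ₘ ↑(heapSiftup (h.set pos (h.getD cp 0)) v cp) = v ::ₘ (h : Multiset Int)
    have hcp : cp < h.length ∧ pos < cp := by
      constructor <;> (simp only [cp]; split <;> omega)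
    have h1 := ih (by simp only [List.length_set]; omega)
    rw [getD_set_ne h pos cp _ (by omega)] at h1
    have h2 := ms_set h pos (h.getD cp 0) hpos
    have e2 : h.getD cp 0 ::ₘ (h.getD pos 0 ::ₘ (↑(heapSiftup (h.set pos (h.getD cp 0)) v cp) : Multiset Int))
        = h.getD cp 0 ::ₘ (v ::ₘ (h : Multiset Int)) := by
      rw [Multiset.cons_swap, h1, Multiset.cons_swap, h2, Multiset.cons_swap]
    exact (Multiset.cons_inj_right _).1 e2
  | case2 h pos hc =>
    rw [heapSiftup]; simp only [hc, reduceDIte]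
    have h1 := siftdown_ms (h.set pos v) v pos (by simp only [List.length_set]; exact hpos)
    rw [getD_set_self h pos v hpos] at h1
    have h3 := (Multiset.cons_inj_right v).1 h1
    rw [h3]
    exact ms_set h pos v hpos

theorem push_ms (h : List Int) (x : Int) :
    ((heapPush h x : List Int) : Multiset Int) = x ::ₘ (h : Multiset Int) := by
  have h1 := siftdown_ms (h ++ [x]) x h.length (by simp)
  have hg : (h ++ [x]).getD h.length 0 = x := by
    simp [List.getD_eq_getElem?_getD, List.getElem?_append_right]
  rw [hg] at h1
  have h2 := (Multiset.cons_inj_right x).1 h1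
  rw [heapPush, h2]
  simp [Multiset.cons_swap]

theorem pop_ms (h : List Int) (hne : h ≠ []) :
    h.getD 0 0 ::ₘ (((heapPop h).2 : List Int) : Multiset Int) = (h : Multiset Int) := by
  rcases List.eq_nil_or_concat h with rfl | ⟨l, a, rfl⟩
  · exact absurd rfl hne
  · rw [heapPop]
    simp only [List.concat_eq_append, List.dropLast_concat, List.getLast?_concat,
      Option.getD_some]
    cases l with
    | nil => simp
    | cons y t =>
      simp only [List.isEmpty_cons, Bool.false_eq_true, if_false]
      have hl : 0 < (y :: t).length := by simp
      have h1 := siftup_ms ((y :: t).set 0 a) a 0 (by simpa using hl)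
      rw [getD_set_self _ 0 a hl] at h1
      have h2 := (Multiset.cons_inj_right a).1 h1
      show ((y :: t) ++ [a]).getD 0 0 ::ₘ _ = _
      rw [h2]
      have h3 := ms_set (y :: t) 0 a hl
      simp only [List.getD_cons_zero] at h3
      rw [show (((y :: t) ++ [a]).getD 0 0) = y by simp [List.getD_eq_getElem?_getD, List.getElem?_append]]
      rw [h3]
      rw [show (y :: t ++ [a]) = ((y :: t) ++ [a]) from rfl, coe_concat]
theorem siftdown_ord (h : List Int) (v : Int) (pos : Nat) (hpos : pos < h.length)
    (I1 : ∀ i, 0 < i → i < h.length → i ≠ pos → (i-1)/2 ≠ pos → h.getD ((i-1)/2) 0 ≤ h.getD i 0)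
    (I2 : ∀ i, 0 < i → i < h.length → (i-1)/2 = pos → v ≤ h.getD i 0)
    (I3 : ∀ i, 0 < i → i < h.length → (i-1)/2 = pos → 0 < pos → h.getD ((pos-1)/2) 0 ≤ h.getD i 0) :
    heapOrd (heapSiftdown h v pos) := by
  induction h, pos using heapSiftdown.induct v with
  | case1 h pos hp pp par hlt ih =>
    have hppv : pp = (pos-1)/2 := rfl
    have hparv : par = h.getD ((pos-1)/2) 0 := rfl
    rw [heapSiftdown]; simp only [hp, reduceDIte]; rw [if_pos hlt]
    have hpp : pp < pos := by omega
    apply ih (by simp only [List.length_set]; omega)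
    · -- I1'
      intro i hi0 hil hip hipp
      rw [List.length_set] at hil
      by_cases hpeq : (i-1)/2 = pos
      · have hine : i ≠ pos := by omega
        rw [getD_set_ne h pos i par (Ne.symm hine), hpeq, getD_set_self h pos par hpos]
        exact I3 i hi0 hil hpeq hp
      · have hine : i ≠ pos := fun hh => hipp (by rw [hh])
        rw [getD_set_ne h pos i par (Ne.symm hine),
            getD_set_ne h pos ((i-1)/2) par (fun hh => hpeq hh.symm)]
        exact I1 i hi0 hil hine hpeq
    · -- I2'
      intro i hi0 hil hipar
      rw [List.length_set] at hil
      by_cases hieq : i = pos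
      · subst hieq
        rw [getD_set_self h i par hpos]
        exact le_of_lt hlt
      · rw [getD_set_ne h pos i par (Ne.symm hieq)]
        have h5 := I1 i hi0 hil hieq (by omega)
        rw [hipar] at h5
        exact le_trans (le_of_lt hlt) h5
    · -- I3'
      intro i hi0 hil hipar hpp0
      rw [List.length_set] at hil
      rw [getD_set_ne h pos ((pp-1)/2) par (by omega)]
      have h6 : h.getD ((pp-1)/2) 0 ≤ h.getD pp 0 :=
        I1 pp (by omega) (by omega) (by omega) (by omega)
      by_cases hieq : i = pos
      · subst hieq
        rw [getD_set_self h i par hpos]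
        exact h6
      · rw [getD_set_ne h pos i par (Ne.symm hieq)]
        have h7 := I1 i hi0 hil hieq (by omega)
        rw [hipar] at h7
        exact le_trans h6 h7
  | case2 h pos hp pp par hnlt =>
    rw [heapSiftdown]; simp only [hp, reduceDIte]; rw [if_neg hnlt]
    intro i hi0 hil
    rw [List.length_set] at hil
    by_cases hieq : i = pos
    · subst hieq
      rw [getD_set_self h i v hpos, getD_set_ne h i ((i-1)/2) v (by omega)]
      exact le_of_not_gt hnlt
    · by_cases hpeq : (i-1)/2 = pos
      · rw [getD_set_ne h pos i v (Ne.symm hieq), hpeq, getD_set_self h pos v hpos]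
        exact I2 i hi0 hil hpeq
      · rw [getD_set_ne h pos i v (Ne.symm hieq),
            getD_set_ne h pos ((i-1)/2) v (fun hh => hpeq hh.symm)]
        exact I1 i hi0 hil hieq hpeq
  | case3 h pos hp =>
    rw [heapSiftdown]; simp only [hp, reduceDIte]
    have hpos0 : pos = 0 := by omega
    subst hpos0
    intro i hi0 hil
    rw [List.length_set] at hil
    by_cases hpeq : (i-1)/2 = 0
    · rw [getD_set_ne h 0 i v (by omega), hpeq, getD_set_self h 0 v hpos]
      exact I2 i hi0 hil hpeq
    · rw [getD_set_ne h 0 i v (by omega), getD_set_ne h 0 ((i-1)/2) v (fun hh => hpeq hh.symm)]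
      exact I1 i hi0 hil (by omega) hpeq
theorem push_ord (h : List Int) (x : Int) (ho : heapOrd h) : heapOrd (heapPush h x) := by
  rw [heapPush]
  apply siftdown_ord (h ++ [x]) x h.length (by simp)
  · intro i hi0 hil hip _
    rw [List.length_append, List.length_singleton] at hil
    have hi : i < h.length := by omega
    rw [List.getD_append _ _ _ _ hi, List.getD_append _ _ _ _ (by omega)]
    exact ho i hi0 hi
  · intro i hi0 hil hipar
    rw [List.length_append, List.length_singleton] at hil
    omega
  · intro i hi0 hil hipar _
    rw [List.length_append, List.length_singleton] at hil
    omega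

theorem siftup_ord (h : List Int) (v : Int) (pos : Nat) (hpos : pos < h.length)
    (J1 : ∀ i, 0 < i → i < h.length → i ≠ pos → (i-1)/2 ≠ pos → h.getD ((i-1)/2) 0 ≤ h.getD i 0)
    (J3 : ∀ i, 0 < i → i < h.length → (i-1)/2 = pos → 0 < pos → h.getD ((pos-1)/2) 0 ≤ h.getD i 0) :
    heapOrd (heapSiftup h v pos) := by
  induction h, pos using heapSiftup.induct with
  | case1 h pos hc cp ih =>
    have hcp : cp < h.length ∧ 2*pos+1 ≤ cp ∧ cp ≤ 2*pos+2 := by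
      refine ⟨?_, ?_, ?_⟩ <;> (simp only [cp]; split <;> omega)
    have hcmin : h.getD cp 0 ≤ h.getD (2*pos+1) 0 ∧
        (2*pos+2 < h.length → h.getD cp 0 ≤ h.getD (2*pos+2) 0) := by
      constructor
      · simp only [cp]; split
        · next hcond => exact le_of_not_gt hcond.2
        · exact le_refl _
      · intro h2
        simp only [cp]; split
        · exact le_refl _
        · next hcond =>
          rcases not_and_or.1 hcond with hbad | hge
          · exact absurd h2 hbad
          · exact le_of_lt (not_not.1 hge)
    rw [heapSiftup]; simp only [hc, reduceDIte]
    apply ih (by simp only [List.length_set]; omega)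
    · -- J1'
      intro i hi0 hil hip hipp
      rw [List.length_set] at hil
      by_cases hieq : i = pos
      · subst hieq
        rw [getD_set_self h i _ hpos, getD_set_ne h i ((i-1)/2) _ (by omega)]
        exact J3 cp (by omega) (by omega) (by omega) hi0
      · by_cases hpeq : (i-1)/2 = pos
        · -- i is the sibling of cp (or cp itself, excluded)
          rw [getD_set_ne h pos i _ (Ne.symm hieq), hpeq, getD_set_self h pos _ hpos]
          have : i = 2*pos+1 ∨ i = 2*pos+2 := by omega
          rcases this with rfl | rfl
          · exact hcmin.1
          · exact hcmin.2 hil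
        · rw [getD_set_ne h pos i _ (Ne.symm hieq),
              getD_set_ne h pos ((i-1)/2) _ (fun hh => hpeq hh.symm)]
          exact J1 i hi0 hil hieq hpeq
    · -- J3'
      intro i hi0 hil hipar hcp0
      rw [List.length_set] at hil
      have hcpar : (cp-1)/2 = pos := by omega
      rw [hcpar, getD_set_self h pos _ hpos, getD_set_ne h pos i _ (by omega)]
      have := J1 i hi0 hil (by omega) (by omega)
      rw [hipar] at this
      exact this
  | case2 h pos hc =>
    rw [heapSiftup]; simp only [hc, reduceDIte]
    apply siftdown_ord (h.set pos v) v pos (by simpa using hpos)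
    · intro i hi0 hil hip hipp
      rw [List.length_set] at hil
      rw [getD_set_ne h pos i _ (Ne.symm hip), getD_set_ne h pos ((i-1)/2) _ (fun hh => hipp hh.symm)]
      exact J1 i hi0 hil hip hipp
    · intro i hi0 hil hipar
      rw [List.length_set] at hil
      omega
    · intro i hi0 hil hipar _
      rw [List.length_set] at hil
      omega

theorem heapOrd_dropLast (h : List Int) (ho : heapOrd h) : heapOrd h.dropLast := by
  intro i hi0 hil
  rw [List.length_dropLast] at hil
  have h1 : ∀ j, j < h.dropLast.length → h.dropLast.getD j 0 = h.getD j 0 := by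
    intro j hj
    rw [List.length_dropLast] at hj
    rw [List.getD_eq_getElem?_getD, List.getD_eq_getElem?_getD, List.getElem?_dropLast]
    simp [hj]
  rw [h1 i (by simp [List.length_dropLast]; omega), h1 ((i-1)/2) (by simp [List.length_dropLast]; omega)]
  exact ho i hi0 (by omega)

theorem pop_ord (h : List Int) (ho : heapOrd h) : heapOrd (heapPop h).2 := by
  rw [heapPop]
  by_cases he : h.dropLast.isEmpty
  · simp only [he, if_true]
    intro i hi0 hil
    rw [List.isEmpty_iff] at he
    rw [he] at hil
    simp at hil
  · simp only [he, if_false]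
    have hne : h.dropLast ≠ [] := fun hh => he (by simp [hh])
    have hl : 0 < h.dropLast.length := List.length_pos_of_ne_nil hne
    apply siftup_ord _ _ 0 (by simpa using hl)
    · intro i hi0 hil hip hipp
      rw [List.length_set] at hil
      rw [getD_set_ne _ 0 i _ (Ne.symm hip), getD_set_ne _ 0 ((i-1)/2) _ (fun hh => hipp hh.symm)]
      exact heapOrd_dropLast h ho i hi0 hil
    · intro i hi0 hil hipar hpos0
      omega
theorem headD_eq_getD (l : List Int) : l.headD 0 = l.getD 0 0 := by cases l <;> rfl

theorem getD_eq_getElem'' (l : List Int) (i : Nat) (h : i < l.length) : l.getD i 0 = l[i] := by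
  simp [List.getD_eq_getElem?_getD, List.getElem?_eq_getElem h]

theorem head_min_eq (lA lB : List Int) (hms : ((lA : List Int) : Multiset Int) = ↑lB)
    (ho : heapOrd lA) (hne : lA ≠ []) :
    lA.getD 0 0 = (PySem.List.min? lB (fun x => x)).getD 0 := by
  have hperm : lA.Perm lB := Multiset.coe_eq_coe.1 hms
  have hneB : lB ≠ [] := fun hh => hne (List.Perm.eq_nil (hh ▸ hperm))
  obtain ⟨m, hm⟩ : ∃ m, PySem.List.min? lB (fun x => x) = some m := by
    cases hmm : PySem.List.min? lB (fun x => x) with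
    | none => exact absurd ((PySem.List.min?_eq_none_iff lB _).1 hmm) hneB
    | some m => exact ⟨m, rfl⟩
  rw [hm, Option.getD_some]
  have hlen : 0 < lA.length := List.length_pos_of_ne_nil hne
  have htopmem : lA.getD 0 0 ∈ lB := by
    rw [getD_eq_getElem'' lA 0 hlen]
    exact hperm.mem_iff.1 (List.getElem_mem hlen)
  have h1 : m ≤ lA.getD 0 0 := PySem.List.min?_isMin hm _ htopmem
  have hmemA : m ∈ lA := hperm.mem_iff.2 (PySem.List.min?_mem hm)
  obtain ⟨i, hi, hgi⟩ := List.mem_iff_getElem.1 hmemA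
  have h2 : lA.getD 0 0 ≤ m := by
    rw [← hgi, ← getD_eq_getElem'' lA i hi]
    exact heapOrd_head_le lA ho i hi
  omega

-- the per-request update of one room: same multiset, heap order kept
theorem step_room (lA lB : List Int) (w : Int) (hms : ((lA : List Int) : Multiset Int) = ↑lB)
    (ho : heapOrd lA) (hne : lA ≠ []) :
    let m := (PySem.List.min? lB (fun x => x)).getD 0
    let newA := heapPush (heapPop lA).2 w
    let newB := lB.set ((PySem.List.index? lB m).getD 0) w
    ((newA : List Int) : Multiset Int) = ↑newB ∧ heapOrd newA ∧ newA.length = lA.length := by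
  intro m newA newB
  have hperm : lA.Perm lB := Multiset.coe_eq_coe.1 hms
  have hlen : 0 < lA.length := List.length_pos_of_ne_nil hne
  have htop : lA.getD 0 0 = m := head_min_eq lA lB hms ho hne
  have hmemB : m ∈ lB := by
    rw [← htop, getD_eq_getElem'' lA 0 hlen]
    exact hperm.mem_iff.1 (List.getElem_mem hlen)
  obtain ⟨k, hk⟩ : ∃ k, PySem.List.index? lB m = some k := by
    cases hkk : PySem.List.index? lB m with
    | none => exact absurd ((PySem.List.index?_eq_none_iff lB m).1 hkk) (by simp [hmemB])
    | some k => exact ⟨k, rfl⟩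
  obtain ⟨hklt, hkv, -⟩ := PySem.List.getElem_of_index?_eq_some hk
  have hidx : (PySem.List.index? lB m).getD 0 = k := by rw [hk]; rfl
  have hgdk : lB.getD k 0 = m := by rw [getD_eq_getElem'' lB k hklt, hkv]
  have hmsB : m ::ₘ ((newB : List Int) : Multiset Int) = w ::ₘ (lB : Multiset Int) := by
    show m ::ₘ ((lB.set ((PySem.List.index? lB m).getD 0) w : List Int) : Multiset Int) = _
    rw [hidx, ← hgdk]
    exact ms_set lB k w hklt
  have hpop := pop_ms lA hne
  have hpush := push_ms (heapPop lA).2 w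
  have hmsA : m ::ₘ ((newA : List Int) : Multiset Int) = w ::ₘ (lA : Multiset Int) := by
    show m ::ₘ ((heapPush (heapPop lA).2 w : List Int) : Multiset Int) = _
    rw [hpush, Multiset.cons_swap, ← htop, hpop]
  refine ⟨?_, ?_, ?_⟩
  · have := hmsA.trans (by rw [hms, ← hmsB])
    exact (Multiset.cons_inj_right m).1 this
  · exact push_ord _ w (pop_ord lA ho)
  · have hcard := congrArg Multiset.card hmsA
    simpa using hcard

def roomsInv (mento : List Int) (rA rB : List (List Int)) : Prop :=
  rA.length = mento.length ∧ rB.length = mento.length ∧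
  ∀ j, j < mento.length →
    heapOrd (rA.getD j []) ∧ ((rA.getD j [] : List Int) : Multiset Int) = ↑(rB.getD j []) ∧
      (rA.getD j []).length = (mento.getD j 0).toNat


theorem pyWrapIdx_lt (len : Nat) (i : Int) (h1 : -(len : Int) ≤ i) (h2 : i < len) :
    pyWrapIdx len i < len := by
  unfold pyWrapIdx; split <;> omega

theorem fold_eq (mento : List Int) (reqs : List (Int × Int × Int)) :
    ∀ (t : Int) (rA rB : List (List Int)), roomsInv mento rA rB →
    (∀ r ∈ reqs, -(mento.length : Int) ≤ r.2.2 - 1 ∧ r.2.2 - 1 < (mento.length : Int) ∧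
      1 ≤ mento.getD (pyWrapIdx mento.length (r.2.2 - 1)) 0) →
    (reqs.foldl caltimeStep (t, rA)).1 = (reqs.foldl caltimeAltStep (t, rB)).1 := by
  induction reqs with
  | nil => intro t rA rB _ _; rfl
  | cons r rest ih =>
    intro t rA rB hinv hpre
    obtain ⟨hlA, hlB, hj⟩ := hinv
    obtain ⟨hb1, hb2, hb3⟩ := hpre r (List.mem_cons_self)
    have hjlt : pyWrapIdx mento.length (r.2.2 - 1) < mento.length := pyWrapIdx_lt _ _ hb1 hb2
    set j := pyWrapIdx mento.length (r.2.2 - 1) with hjdef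
    obtain ⟨hoj, hmsj, hlenj⟩ := hj j hjlt
    have hnej : rA.getD j [] ≠ [] := by
      intro hh
      rw [hh] at hlenj
      simp only [List.length_nil] at hlenj
      omega
    have hstep := step_room (rA.getD j []) (rB.getD j []) (r.1 + r.2.1 + (if (PySem.List.min? (rB.getD j []) (fun x => x)).getD 0 > r.1 then (PySem.List.min? (rB.getD j []) (fun x => x)).getD 0 - r.1 else 0)) hmsj hoj hnej
    simp only at hstep
    obtain ⟨hms', ho', hlen'⟩ := hstep
    have htop : (rA.getD j []).headD 0 = (PySem.List.min? (rB.getD j []) (fun x => x)).getD 0 := by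
      rw [headD_eq_getD]
      exact head_min_eq _ _ hmsj hoj hnej
    rw [List.foldl_cons, List.foldl_cons]
    rw [show caltimeStep (t, rA) r = (t + (if (rA.getD j []).headD 0 > r.1 then (rA.getD j []).headD 0 - r.1 else 0), rA.set j (heapPush (heapPop (rA.getD j [])).2 (r.1 + r.2.1 + (if (rA.getD j []).headD 0 > r.1 then (rA.getD j []).headD 0 - r.1 else 0)))) from by
      simp only [caltimeStep, hlA]; rfl]
    rw [show caltimeAltStep (t, rB) r = (t + (if (PySem.List.min? (rB.getD j []) (fun x => x)).getD 0 > r.1 then (PySem.List.min? (rB.getD j []) (fun x => x)).getD 0 - r.1 else 0), rB.set j ((rB.getD j []).set ((PySem.List.index? (rB.getD j []) ((PySem.List.min? (rB.getD j []) (fun x => x)).getD 0)).getD 0) (r.1 + r.2.1 + (if (PySem.List.min? (rB.getD j []) (fun x => x)).getD 0 > r.1 then (PySem.List.min? (rB.getD j []) (fun x => x)).getD 0 - r.1 else 0)))) from by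
      simp only [caltimeAltStep, hlB]; rfl]
    rw [htop]
    apply ih
    · refine ⟨by simp [hlA], by simp [hlB], ?_⟩
      intro j' hj'
      by_cases hjj : j' = j
      · rw [hjj, getD_set_self' rA j _ [] (by omega), getD_set_self' rB j _ [] (by omega)]
        exact ⟨ho', hms', by rw [hlen']; exact hlenj⟩
      · rw [getD_set_ne' rA j j' _ [] (fun hh => hjj hh.symm),
            getD_set_ne' rB j j' _ [] (fun hh => hjj hh.symm)]
        exact hj j' hj'
    · intro r' hr'
      exact hpre r' (List.mem_cons_of_mem _ hr')

theorem getD_replicate' (n : Nat) (i : Nat) (h : i < n) :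
    (List.replicate n (0 : Int)).getD i 0 = 0 := by
  simp [List.getD_eq_getElem?_getD, List.getElem?_replicate, h]

theorem init_inv (mento : List Int) :
    roomsInv mento (mento.map (fun i => List.replicate i.toNat 0))
      (mento.map (fun i => List.replicate i.toNat 0)) := by
  refine ⟨by simp, by simp, ?_⟩
  intro j hj
  have hgd : (mento.map (fun i => List.replicate i.toNat (0 : Int))).getD j []
      = List.replicate (mento.getD j 0).toNat 0 := by
    rw [getD_eq_getElem'' mento j hj]
    simp [List.getD_eq_getElem?_getD, List.getElem?_eq_getElem, hj]
  rw [hgd]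
  refine ⟨?_, rfl, by simp⟩
  intro i hi0 hil
  rw [List.length_replicate] at hil
  rw [getD_replicate' _ _ (by omega), getD_replicate' _ _ hil]

-- ===== VERDICT (by name: the statement is the Claim_ definition above) =====
theorem caltime_spec : Claim_equal_caltime := by
  intro n k reqs mento hdom hpre
  show caltime n k reqs mento = caltime_alt n k reqs mento
  unfold caltime caltime_alt
  exact fold_eq mento reqs 0 _ _ (init_inv mento) hpre
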